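-- pv_equiv track=rewrite | github.com/xu-kj/leetcode.python | problems/914/solution.py | hasGroupsSizeX
-- ===== SOURCE A (Python) =====
-- from typing import List
-- import collections
--
-- def hasGroupsSizeX(deck: List[int]) -> bool:
--     summary = collections.Counter(deck)
--     m = min(summary.values())
--     for i in range(2, m + 1):
--         if m % i != 0:
--             continue
--
--         check = True
--         s = 0
--         for count in summary.values():
--             if count % i != 0:
--                 check = False
--                 break
--
--             s += count // i
--
--         if check:
--             return True
--     return False
-- ===== SOURCE B (Python) =====
-- import collections
--
--
-- def _gcd(a, b):
--     while b:
--         a, b = b, a % b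
--     return a
--
--
-- def hasGroupsSizeX(deck):
--     g = 0
--     for count in collections.Counter(deck).values():
--         g = _gcd(g, count)
--     return g >= 2
-- ===== Notes on version B (the rewrite author's own statement) =====
-- stated objective: simpler
-- what changed: Replaces the trial of every candidate group size 2..min(counts) with an inner divisibility scan of all counts by a single Euclidean-GCD fold over the counts, returning gcd >= 2.
import Mathlib
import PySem

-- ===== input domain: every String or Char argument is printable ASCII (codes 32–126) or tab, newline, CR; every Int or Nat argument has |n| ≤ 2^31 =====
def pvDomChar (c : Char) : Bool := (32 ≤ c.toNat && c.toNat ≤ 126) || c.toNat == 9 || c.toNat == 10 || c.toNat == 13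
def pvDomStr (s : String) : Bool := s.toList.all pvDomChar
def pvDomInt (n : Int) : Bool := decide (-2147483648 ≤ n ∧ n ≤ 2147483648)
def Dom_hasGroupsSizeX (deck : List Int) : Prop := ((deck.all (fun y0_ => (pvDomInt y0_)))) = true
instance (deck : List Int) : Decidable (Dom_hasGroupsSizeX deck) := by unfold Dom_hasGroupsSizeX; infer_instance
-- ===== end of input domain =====

-- B replaces A's trial of every candidate size 2..min(counts) (with an inner scan of all
-- counts) by a single Euclidean-GCD fold over the counts; objective: simpler.

-- ===== PORT A =====
-- inner 'for count in summary.values()' loop with its break, state (check, s)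
def pvInnerA (i : Int) (counts : List Int) (check : Bool) (s : Int) : Bool × Int :=
  match counts with
  | [] => (check, s)
  | c :: rest =>
    if PySem.Int.mod c i ≠ 0 then (false, s)
    else pvInnerA i rest check (s + PySem.Int.floordiv c i)

-- outer 'for i in range(2, m + 1)' loop with its early return
def pvOuterA (m : Int) (vals : List Int) : List Int → Bool
  | [] => false
  | i :: rest =>
    if PySem.Int.mod m i ≠ 0 then pvOuterA m vals rest
    else
      let r := pvInnerA i vals true 0
      if r.1 then true else pvOuterA m vals rest

def hasGroupsSizeX (deck : List Int) : Bool :=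
  let summary := PySem.Dict.counter deck
  match PySem.List.min? summary.values (fun x => x) with
  | none => false  -- Python raises ValueError here (empty deck); excluded by Pre_
  | some m => pvOuterA m summary.values (PySem.List.pyRange 2 (m + 1) 1)

-- ===== PORT B =====
-- termination lemma for the Euclid loop (cited by decreasing_by)
theorem pvGcd_mod_natAbs_lt (a b : Int) (hb : ¬ b = 0) :
    (PySem.Int.mod a b).natAbs < b.natAbs := by
  rcases lt_trichotomy b 0 with h | h | h
  · have := PySem.Int.mod_neg_bounds a h
    omega
  · exact absurd h hb
  · have h1 := PySem.Int.mod_nonneg a h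
    have h2 := PySem.Int.mod_lt a h
    omega

-- while b: a, b = b, a % b
def pvGcd (a b : Int) : Int :=
  if _h : b = 0 then a
  else pvGcd b (PySem.Int.mod a b)
termination_by b.natAbs
decreasing_by exact pvGcd_mod_natAbs_lt a b _h

def hasGroupsSizeX_alt (deck : List Int) : Bool :=
  let g := (PySem.Dict.counter deck).values.foldl (fun g c => pvGcd g c) 0
  decide (2 ≤ g)

-- ===== PRECONDITION & SPEC =====
-- Pre_ excludes the empty deck, on which Python A raises ValueError (min of an empty sequence).
def Pre_hasGroupsSizeX (deck : List Int) : Prop := deck ≠ []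
instance (deck : List Int) : Decidable (Pre_hasGroupsSizeX deck) := by unfold Pre_hasGroupsSizeX; infer_instance

def pvWitness_hasGroupsSizeX : List Int := [1, 2, 2]

def Spec_hasGroupsSizeX (deck : List Int) (out : Bool) : Prop := out = hasGroupsSizeX_alt deck
instance (deck : List Int) (out : Bool) : Decidable (Spec_hasGroupsSizeX deck out) := by unfold Spec_hasGroupsSizeX; infer_instance

-- ===== CLAIM (what is proved, stated in full; the proofs are below) =====
def Claim_equal_hasGroupsSizeX : Prop := ∀ (deck : List Int), Dom_hasGroupsSizeX deck → Pre_hasGroupsSizeX deck → Spec_hasGroupsSizeX deck (hasGroupsSizeX deck)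

-- ===== LEMMAS AND PROOFS =====

theorem pvGcd_dvd (a b : Int) : pvGcd a b ∣ a ∧ pvGcd a b ∣ b := by
  by_cases hb : b = 0
  · subst hb; rw [pvGcd]; simp
  · rw [pvGcd]; simp only [hb, dite_false]
    obtain ⟨h1, h2⟩ := pvGcd_dvd b (PySem.Int.mod a b)
    refine ⟨?_, h1⟩
    have := PySem.Int.floordiv_mul_add_mod a b
    calc pvGcd b (PySem.Int.mod a b) ∣ PySem.Int.floordiv a b * b + PySem.Int.mod a b :=
      Dvd.dvd.add (Dvd.dvd.mul_left h1 _) h2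
    _ = a := this
termination_by b.natAbs
decreasing_by exact pvGcd_mod_natAbs_lt a b hb

theorem dvd_pvGcd (d a b : Int) (ha : d ∣ a) (hb : d ∣ b) : d ∣ pvGcd a b := by
  by_cases h : b = 0
  · subst h; rw [pvGcd]; simpa
  · rw [pvGcd]; simp only [h, dite_false]
    refine dvd_pvGcd d b (PySem.Int.mod a b) hb ?_
    have heq := PySem.Int.floordiv_mul_add_mod a b
    have : PySem.Int.mod a b = a - PySem.Int.floordiv a b * b := by omega
    rw [this]
    exact Dvd.dvd.sub ha (Dvd.dvd.mul_left hb _)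
termination_by b.natAbs
decreasing_by exact pvGcd_mod_natAbs_lt a b h

theorem pvGcd_nonneg (a b : Int) (ha : 0 ≤ a) (hb : 0 ≤ b) : 0 ≤ pvGcd a b := by
  by_cases h : b = 0
  · subst h; rw [pvGcd]; simpa
  · rw [pvGcd]; simp only [h, dite_false]
    exact pvGcd_nonneg b _ hb (PySem.Int.mod_nonneg a (by omega))
termination_by b.natAbs
decreasing_by exact pvGcd_mod_natAbs_lt a b h

-- fold of pvGcd: divides the seed and every element
theorem gfold_dvd (vals : List Int) (init : Int) :
    (vals.foldl (fun g c => pvGcd g c) init ∣ init) ∧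
    ∀ c ∈ vals, vals.foldl (fun g c => pvGcd g c) init ∣ c := by
  induction vals generalizing init with
  | nil => simp
  | cons c t ih =>
    obtain ⟨h1, h2⟩ := ih (pvGcd init c)
    obtain ⟨g1, g2⟩ := pvGcd_dvd init c
    simp only [List.foldl_cons]
    refine ⟨h1.trans g1, ?_⟩
    intro x hx
    rcases List.mem_cons.mp hx with rfl | hx
    · exact h1.trans g2
    · exact h2 x hx

theorem dvd_gfold (vals : List Int) (init d : Int) (hi : d ∣ init)
    (h : ∀ c ∈ vals, d ∣ c) : d ∣ vals.foldl (fun g c => pvGcd g c) init := by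
  induction vals generalizing init with
  | nil => simpa
  | cons c t ih =>
    exact ih (pvGcd init c) (dvd_pvGcd d init c hi (h c (by simp))) (fun x hx => h x (by simp [hx]))

theorem gfold_nonneg (vals : List Int) (init : Int) (hi : 0 ≤ init)
    (h : ∀ c ∈ vals, 0 ≤ c) : 0 ≤ vals.foldl (fun g c => pvGcd g c) init := by
  induction vals generalizing init with
  | nil => simpa
  | cons c t ih =>
    exact ih (pvGcd init c) (pvGcd_nonneg init c hi (h c (by simp))) (fun x hx => h x (by simp [hx]))

-- A's inner loop returns true iff every count is divisible by i
theorem pvInnerA_fst (i : Int) (counts : List Int) (s : Int) :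
    (pvInnerA i counts true s).1 = counts.all (fun c => PySem.Int.mod c i == 0) := by
  induction counts generalizing s with
  | nil => simp [pvInnerA]
  | cons c t ih =>
    by_cases h : PySem.Int.mod c i = 0
    · simp [pvInnerA, h, ih]
    · simp [pvInnerA, h]

-- A's outer loop: true iff some candidate i in the list divides m and every count
theorem pvOuterA_true_iff (m : Int) (vals : List Int) (l : List Int) :
    pvOuterA m vals l = true ↔
      ∃ i ∈ l, PySem.Int.mod m i = 0 ∧ ∀ c ∈ vals, PySem.Int.mod c i = 0 := by
  induction l with
  | nil => simp [pvOuterA]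
  | cons i rest ih =>
    have hexp : pvOuterA m vals (i :: rest) =
        if PySem.Int.mod m i ≠ 0 then pvOuterA m vals rest
        else if (pvInnerA i vals true 0).1 then true else pvOuterA m vals rest := rfl
    have hall_iff : (pvInnerA i vals true 0).1 = true ↔ ∀ c ∈ vals, PySem.Int.mod c i = 0 := by
      rw [pvInnerA_fst]; simp
    rw [hexp]
    by_cases h : PySem.Int.mod m i = 0
    · by_cases hall : ∀ c ∈ vals, PySem.Int.mod c i = 0
      · rw [if_neg (by simpa using h), if_pos (hall_iff.mpr hall)]
        exact iff_of_true rfl ⟨i, by simp, h, hall⟩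
      · rw [if_neg (by simpa using h), if_neg (by simpa [hall_iff] using hall), ih]
        constructor
        · rintro ⟨j, hj, hj1, hj2⟩; exact ⟨j, List.mem_cons_of_mem _ hj, hj1, hj2⟩
        · rintro ⟨j, hj, hj1, hj2⟩
          rcases List.mem_cons.mp hj with rfl | hj
          · exact absurd hj2 hall
          · exact ⟨j, hj, hj1, hj2⟩
    · rw [if_pos (by simpa using h), ih]
      constructor
      · rintro ⟨j, hj, hj1, hj2⟩; exact ⟨j, List.mem_cons_of_mem _ hj, hj1, hj2⟩
      · rintro ⟨j, hj, hj1, hj2⟩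
        rcases List.mem_cons.mp hj with rfl | hj
        · exact absurd hj1 h
        · exact ⟨j, hj, hj1, hj2⟩

-- counter values are the counts of the distinct elements
theorem counter_values_eq (deck : List Int) :
    (PySem.Dict.counter deck).values = (PySem.Set.ofList deck).map (fun k => ((deck.count k : Nat) : Int)) := by
  have h := PySem.Dict.items_counter (xs := deck)
  have h2 : (PySem.Dict.counter deck).values = (PySem.Dict.counter deck).items.map (·.2) := rfl
  rw [h2, h, List.map_map]
  rfl

theorem counter_values_pos (deck : List Int) :
    ∀ v ∈ (PySem.Dict.counter deck).values, 0 < v := by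
  rw [counter_values_eq]
  intro v hv
  obtain ⟨k, hk, rfl⟩ := List.mem_map.mp hv
  have hkd : k ∈ deck := (PySem.Set.mem_ofList deck k).mp hk
  have := List.count_pos_iff.mpr hkd
  exact_mod_cast this

theorem counter_values_ne_nil (deck : List Int) (h : deck ≠ []) :
    (PySem.Dict.counter deck).values ≠ [] := by
  rw [counter_values_eq]
  cases deck with
  | nil => exact absurd rfl h
  | cons x t =>
    intro hc
    have hx : x ∈ PySem.Set.ofList (x :: t) := (PySem.Set.mem_ofList _ x).mpr (by simp)
    have hm : ((((x :: t).count x : Nat)) : Int) ∈ (PySem.Set.ofList (x :: t)).map (fun k => (((x :: t).count k : Nat) : Int)) :=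
      List.mem_map.mpr ⟨x, hx, rfl⟩
    rw [hc] at hm
    exact absurd hm (List.not_mem_nil)

-- the heart of the equivalence: A's candidate search equals B's gcd test
theorem pvMain_eq (vals : List Int) (m : Int) (hpos : ∀ v ∈ vals, 0 < v) (hmmem : m ∈ vals) :
    pvOuterA m vals (PySem.List.pyRange 2 (m + 1) 1)
      = decide (2 ≤ vals.foldl (fun g c => pvGcd g c) 0) := by
  have hmpos : 0 < m := hpos m hmmem
  set G := vals.foldl (fun g c => pvGcd g c) 0 with hG
  have hGdvd : ∀ c ∈ vals, G ∣ c := (gfold_dvd vals 0).2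
  have hGm : G ∣ m := hGdvd m hmmem
  have hGnn : 0 ≤ G := gfold_nonneg vals 0 le_rfl (fun c hc => le_of_lt (hpos c hc))
  have hGpos : 0 < G := by
    rcases hGnn.lt_or_eq with hlt | heq
    · exact hlt
    · exfalso; rw [← heq] at hGm; have := zero_dvd_iff.mp hGm; omega
  by_cases hAB : 2 ≤ G
  · have hGle : G ≤ m := Int.le_of_dvd hmpos hGm
    have ht : pvOuterA m vals (PySem.List.pyRange 2 (m + 1) 1) = true := by
      rw [pvOuterA_true_iff]
      refine ⟨G, PySem.List.mem_pyRange_one.mpr ⟨hAB, by omega⟩, ?_, ?_⟩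
      · exact (PySem.Int.mod_eq_zero_iff_dvd m G).mpr hGm
      · exact fun c hc => (PySem.Int.mod_eq_zero_iff_dvd c G).mpr (hGdvd c hc)
    rw [ht]
    simp [hAB]
  · have hf : pvOuterA m vals (PySem.List.pyRange 2 (m + 1) 1) = false := by
      rw [Bool.eq_false_iff]
      intro hcon
      obtain ⟨i, hil, _, hiall⟩ := (pvOuterA_true_iff m vals _).mp hcon
      obtain ⟨hi2, _⟩ := PySem.List.mem_pyRange_one.mp hil
      have hiG : i ∣ G := dvd_gfold vals 0 i (dvd_zero i)
        (fun c hc => (PySem.Int.mod_eq_zero_iff_dvd c i).mp (hiall c hc))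
      have := Int.le_of_dvd hGpos hiG
      omega
    rw [hf]
    simp [hAB]

-- ===== VERDICT (by name: the statement is the Claim_ definition above) =====
theorem hasGroupsSizeX_spec : Claim_equal_hasGroupsSizeX := by
  intro deck _ hpre
  have hne : (PySem.Dict.counter deck).values ≠ [] := counter_values_ne_nil deck hpre
  have hpos := counter_values_pos deck
  show hasGroupsSizeX deck = hasGroupsSizeX_alt deck
  obtain ⟨m, hm⟩ : ∃ m, PySem.List.min? (PySem.Dict.counter deck).values (fun x => x) = some m := by
    cases hmin : PySem.List.min? (PySem.Dict.counter deck).values (fun x => x) with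
    | none => exact absurd ((PySem.List.min?_eq_none_iff _ _).mp hmin) hne
    | some m => exact ⟨m, rfl⟩
  have hmmem : m ∈ (PySem.Dict.counter deck).values := PySem.List.min?_mem hm
  simp only [hasGroupsSizeX, hasGroupsSizeX_alt, hm]
  exact pvMain_eq _ m hpos hmmem
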